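-- pv_equiv track=rewrite | github.com/fatal-exception/project | hansard_gathering/interpolate.py | ngram_span_search_named_entities
-- ===== SOURCE A (Python) =====
-- from typing import List
--
-- def ngram_span_search_named_entities(ngram_span_window, text, all_places: List[str],
--                                      all_companies: List[str], all_people: List[str]):
--     """
--     Take a window e.g.((0, 1), (2, 6), (7, 15), (16, 19)) from a text. Starting with the longest
--     suffix (0-19 here), and working back via middle (e.g. 0-15) to the first (0-1),
--     check all NE lists for the text bounded by these indices.
--     If matches, return where the match started and ended, and which NE it is.
--     Note that because we pad_right, later elements in the tuple might be None, e.g.: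
--     ((98, 102), (102, 103), None, None)
--     :param ngram_span_window: As shown in example above, taken from span_tokenize.
--     :param text: The debate text we are examining
--     :param all_places: NE list
--     :param all_companies: NE list
--     :param all_people: NE list
--     :return: match_start where match starts, match_end where match ends (half-open?), ne_type as int
--     where 1 = LOC, 2 = ORG, 3 = PER, 0 = null
--     """
--     start_index = ngram_span_window[0][0]
--     for end_index in reversed([tup[-1] for tup in ngram_span_window if tup is not None]):
--         if text[start_index:end_index] in all_places:
--             return start_index, end_index, 1
--         elif text[start_index:end_index] in all_companies:
--             return start_index, end_index, 2
--         elif text[start_index:end_index] in all_people: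
--             return start_index, end_index, 3
--
--     return 0, 0, 0
-- ===== SOURCE B (Python) =====
-- def ngram_span_search_named_entities(ngram_span_window, text, all_places,
--                                      all_companies, all_people):
--     # Priority table: people=3, then companies=2, then places=1 so on a
--     # collision the later, higher-priority code (places > companies > people)
--     # overwrites and one lookup replaces the three membership branches.
--     table = {}
--     for s in all_people:
--         table[s] = 3
--     for s in all_companies:
--         table[s] = 2
--     for s in all_places:
--         table[s] = 1
--     start_index = ngram_span_window[0][0]
--     # A returns the FIRST match over the reversed end-offsets, i.e. the LAST
--     # matching end in forward order.  So: one forward pass with an accumulator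
--     # holding the last match seen (no reversal, no early return).
--     best = (0, 0, 0)
--     for tup in ngram_span_window:
--         if tup is None:
--             continue
--         code = table.get(text[start_index:tup[-1]])
--         if code is not None:
--             best = (start_index, tup[-1], code)
--     return best
-- ===== Notes on version B (the rewrite author's own statement) =====
-- stated objective: faster
-- what changed: B replaces A's reverse scan with three list-membership tests per candidate by a single forward fold: it builds one priority dict once (people=3, then companies=2, then places=1, later inserts overwriting on collision) and makes one forward pass over the window keeping the LAST matching end in an accumulator (which equals A's first match over the reversed ends) with one O(1) lookup per candidate; no reversal, no early return.
import Mathlib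
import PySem

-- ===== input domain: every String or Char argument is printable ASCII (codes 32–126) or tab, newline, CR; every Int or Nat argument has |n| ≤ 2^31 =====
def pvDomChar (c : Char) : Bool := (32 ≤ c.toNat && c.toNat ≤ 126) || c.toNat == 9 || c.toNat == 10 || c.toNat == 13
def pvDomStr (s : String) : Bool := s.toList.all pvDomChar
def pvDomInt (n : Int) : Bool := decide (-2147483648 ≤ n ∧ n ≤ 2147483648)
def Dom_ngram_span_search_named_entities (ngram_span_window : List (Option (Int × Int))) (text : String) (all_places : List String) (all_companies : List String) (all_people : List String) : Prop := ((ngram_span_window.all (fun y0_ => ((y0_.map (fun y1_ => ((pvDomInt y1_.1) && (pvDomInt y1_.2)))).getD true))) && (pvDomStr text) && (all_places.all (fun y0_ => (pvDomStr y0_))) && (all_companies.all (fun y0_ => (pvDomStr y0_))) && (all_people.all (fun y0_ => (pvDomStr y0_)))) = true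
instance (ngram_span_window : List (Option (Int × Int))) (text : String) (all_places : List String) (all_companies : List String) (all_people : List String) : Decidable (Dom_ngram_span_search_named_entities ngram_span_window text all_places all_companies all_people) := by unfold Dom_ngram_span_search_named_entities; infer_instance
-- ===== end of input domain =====

-- ===== PORT A =====
-- B replaces A's reverse scan (three membership tests per candidate, early return)
-- by one priority dict and a single FORWARD fold keeping the last match; the
-- equivalence is about the return value. A raises on an empty window or a None
-- first element; Pre_ excludes exactly those inputs (B raises there too).

-- A's loop body: for end_index in <reversed ends>: three membership branches
def loopA_ngram (text : String) (all_places all_companies all_people : List String)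
    (start_index : Int) : List Int → Int × Int × Int
  | [] => (0, 0, 0)
  | e :: rest =>
    let s := PySem.Str.slice text (some start_index) (some e)
    if s ∈ all_places then (start_index, e, 1)
    else if s ∈ all_companies then (start_index, e, 2)
    else if s ∈ all_people then (start_index, e, 3)
    else loopA_ngram text all_places all_companies all_people start_index rest

def ngram_span_search_named_entities (ngram_span_window : List (Option (Int × Int))) (text : String) (all_places : List String) (all_companies : List String) (all_people : List String) : Int × Int × Int :=
  match ngram_span_window with
  | some t :: _ =>
    let start_index := t.1
    -- reversed([tup[-1] for tup in ngram_span_window if tup is not None])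
    loopA_ngram text all_places all_companies all_people start_index
      (((ngram_span_window.filterMap id).map (fun tup => tup.2)).reverse)
  | _ => (0, 0, 0)  -- unreachable under Pre_ (A raises here)

-- ===== PORT B =====
-- B's single forward pass: skip None, one table lookup, keep the last match seen
def stepB_ngram (text : String) (table : PySem.Dict String Int) (start_index : Int)
    (best : Int × Int × Int) (o : Option (Int × Int)) : Int × Int × Int :=
  match o with
  | none => best
  | some tup =>
    match table.get? (PySem.Str.slice text (some start_index) (some tup.2)) with
    | some code => (start_index, tup.2, code)
    | none => best

def ngram_span_search_named_entities_alt (ngram_span_window : List (Option (Int × Int))) (text : String) (all_places : List String) (all_companies : List String) (all_people : List String) : Int × Int × Int :=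
  let t1 := all_people.foldl (fun d s => d.insert s (3 : Int)) PySem.Dict.empty
  let t2 := all_companies.foldl (fun d s => d.insert s (2 : Int)) t1
  let table := all_places.foldl (fun d s => d.insert s (1 : Int)) t2
  match ngram_span_window.head?.getD none with
  | some t => ngram_span_window.foldl (stepB_ngram text table t.1) (0, 0, 0)
  | none => (0, 0, 0)  -- unreachable under Pre_ (B raises here too)

-- ===== PRECONDITION & SPEC =====
-- A raises (IndexError / TypeError) iff the window is empty or starts with None; Pre_ excludes exactly that.
def Pre_ngram_span_search_named_entities (ngram_span_window : List (Option (Int × Int))) (text : String) (all_places : List String) (all_companies : List String) (all_people : List String) : Prop :=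
  (ngram_span_window.head?.getD none).isSome = true
instance (ngram_span_window : List (Option (Int × Int))) (text : String) (all_places : List String) (all_companies : List String) (all_people : List String) : Decidable (Pre_ngram_span_search_named_entities ngram_span_window text all_places all_companies all_people) := by unfold Pre_ngram_span_search_named_entities; infer_instance
def pvWitness_ngram_span_search_named_entities : (List (Option (Int × Int))) × String × List String × List String × List String :=
  ([some (0, 2)], "ab", ["ab"], [], [])

def Spec_ngram_span_search_named_entities (ngram_span_window : List (Option (Int × Int))) (text : String) (all_places : List String) (all_companies : List String) (all_people : List String) (out : Int × Int × Int) : Prop := out = ngram_span_search_named_entities_alt ngram_span_window text all_places all_companies all_people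
instance (ngram_span_window : List (Option (Int × Int))) (text : String) (all_places : List String) (all_companies : List String) (all_people : List String) (out : Int × Int × Int) : Decidable (Spec_ngram_span_search_named_entities ngram_span_window text all_places all_companies all_people out) := by unfold Spec_ngram_span_search_named_entities; infer_instance

-- ===== CLAIM (what is proved, stated in full; the proofs are below) =====
def Claim_equal_ngram_span_search_named_entities : Prop := ∀ (ngram_span_window : List (Option (Int × Int))) (text : String) (all_places : List String) (all_companies : List String) (all_people : List String), Dom_ngram_span_search_named_entities ngram_span_window text all_places all_companies all_people → Pre_ngram_span_search_named_entities ngram_span_window text all_places all_companies all_people → Spec_ngram_span_search_named_entities ngram_span_window text all_places all_companies all_people (ngram_span_search_named_entities ngram_span_window text all_places all_companies all_people)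

-- ===== LEMMAS AND PROOFS =====

theorem get?_foldl_insert_const (xs : List String) (d : PySem.Dict String Int)
    (c : Int) (k : String) :
    (xs.foldl (fun d s => d.insert s c) d).get? k
      = if k ∈ xs then some c else d.get? k := by
  induction xs generalizing d with
  | nil => simp
  | cons x xs ih =>
    simp only [List.foldl_cons, ih, PySem.Dict.get?_insert, List.mem_cons]
    by_cases hx : k = x <;> by_cases hm : k ∈ xs <;> simp [hx, hm]

theorem table_get (all_places all_companies all_people : List String) (k : String) :
    ((all_places.foldl (fun d s => d.insert s (1 : Int))
      (all_companies.foldl (fun d s => d.insert s (2 : Int))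
        (all_people.foldl (fun d s => d.insert s (3 : Int)) PySem.Dict.empty))).get? k)
      = if k ∈ all_places then some 1
        else if k ∈ all_companies then some 2
        else if k ∈ all_people then some 3 else none := by
  simp only [get?_foldl_insert_const, PySem.Dict.get?_empty]

-- A's loop as an Option-valued search (none = fell through)
def optA_ngram (text : String) (all_places all_companies all_people : List String)
    (start_index : Int) : List Int → Option (Int × Int × Int)
  | [] => none
  | e :: rest =>
    let s := PySem.Str.slice text (some start_index) (some e)
    if s ∈ all_places then some (start_index, e, 1)
    else if s ∈ all_companies then some (start_index, e, 2)
    else if s ∈ all_people then some (start_index, e, 3)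
    else optA_ngram text all_places all_companies all_people start_index rest

theorem loopA_eq_optA (text : String) (pl cm pp : List String) (st : Int) (l : List Int) :
    loopA_ngram text pl cm pp st l = (optA_ngram text pl cm pp st l).getD (0, 0, 0) := by
  induction l with
  | nil => rfl
  | cons e rest ih =>
    simp only [loopA_ngram, optA_ngram, ih]
    split_ifs <;> simp

theorem optA_append (text : String) (pl cm pp : List String) (st : Int) (xs ys : List Int) :
    optA_ngram text pl cm pp st (xs ++ ys)
      = (optA_ngram text pl cm pp st xs).or (optA_ngram text pl cm pp st ys) := by
  induction xs with
  | nil => simp [optA_ngram]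
  | cons e rest ih =>
    simp only [List.cons_append, optA_ngram, ih]
    split_ifs <;> simp

-- the forward fold computes the last match, i.e. A's first match over the reversed ends
theorem foldl_eq_optA (text : String) (pl cm pp : List String) (st : Int)
    (l : List (Option (Int × Int))) (acc : Int × Int × Int) :
    l.foldl (stepB_ngram text
        (pl.foldl (fun d s => d.insert s (1 : Int))
          (cm.foldl (fun d s => d.insert s (2 : Int))
            (pp.foldl (fun d s => d.insert s (3 : Int)) PySem.Dict.empty))) st) acc
      = (optA_ngram text pl cm pp st
          (((l.filterMap id).map (fun tup => tup.2)).reverse)).getD acc := by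
  induction l generalizing acc with
  | nil => rfl
  | cons o rest ih =>
    cases o with
    | none => simpa [stepB_ngram] using ih acc
    | some tup =>
      rw [List.foldl_cons, ih]
      simp only [List.filterMap_cons, id_eq, List.map_cons, List.reverse_cons, optA_append]
      cases h : optA_ngram text pl cm pp st (((rest.filterMap (fun x => x)).map (fun tup => tup.2)).reverse) with
      | some r => simp
      | none =>

        simp only [Option.none_or, Option.getD_none]
        simp only [stepB_ngram, table_get, optA_ngram]
        split_ifs <;> simp

-- ===== VERDICT (by name: the statement is the Claim_ definition above) =====
theorem ngram_span_search_named_entities_spec : Claim_equal_ngram_span_search_named_entities := by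
  intro w text pl cm pp _ hpre
  unfold Spec_ngram_span_search_named_entities
  unfold Pre_ngram_span_search_named_entities at hpre
  match w with
  | [] => simp at hpre
  | none :: _ => simp at hpre
  | some t :: rest =>
    show ngram_span_search_named_entities (some t :: rest) text pl cm pp
        = ngram_span_search_named_entities_alt (some t :: rest) text pl cm pp
    unfold ngram_span_search_named_entities ngram_span_search_named_entities_alt
    simp only [List.head?_cons, Option.getD_some, foldl_eq_optA, loopA_eq_optA]
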